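-- pv_equiv track=rewrite | github.com/ShuvalovAnthony/ez_python | Polina/8/21894.py | check
-- ===== SOURCE A (Python) =====
-- def check(num: str):
--     if num[0] == '0': return False
--
--     if len(set(num)) < 4: return False
--
--     for i in '2468':
--         num = num.replace(i, '0')
--     for i in '3579':
--         num = num.replace(i, '1')
--
--     return ('00' not in num) and ('11' not in num)
-- ===== SOURCE B (Python) =====
-- def check(num: str):
--     if num[0] == '0': return False
--
--     if len(set(num)) < 4: return False
--
--     # single pass over adjacent pairs: fail on two adjacent same-parity digits
--     def par(c):
--         return int(c) % 2 if c.isdigit() else None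
--
--     for a, b in zip(num, num[1:]):
--         pa, pb = par(a), par(b)
--         if pa is not None and pa == pb:
--             return False
--     return True
-- ===== Notes on version B (the rewrite author's own statement) =====
-- stated objective: simpler
-- what changed: Replaces the eight string-rewriting replace() passes plus two substring scans with one direct pass over adjacent character pairs that rejects two neighbouring same-parity digits.
import Mathlib
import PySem

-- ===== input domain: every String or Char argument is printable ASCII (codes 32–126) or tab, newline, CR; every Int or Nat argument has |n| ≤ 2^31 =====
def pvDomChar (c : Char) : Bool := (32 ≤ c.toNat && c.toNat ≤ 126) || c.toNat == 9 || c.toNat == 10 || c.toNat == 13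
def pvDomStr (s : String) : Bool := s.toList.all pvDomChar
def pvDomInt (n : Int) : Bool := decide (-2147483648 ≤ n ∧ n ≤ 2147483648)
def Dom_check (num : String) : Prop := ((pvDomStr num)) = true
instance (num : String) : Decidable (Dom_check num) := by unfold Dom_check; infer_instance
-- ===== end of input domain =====

-- B replaces A's eight replace() passes and two substring scans by one direct pass over
-- adjacent pairs that rejects two neighbouring same-parity digits (objective: simpler).

-- ===== PORT A =====
def check (num : String) : Bool :=
  -- if num[0] == '0': return False   (num[0] raises IndexError on "", excluded by Pre_check)
  if PySem.Str.pyGet? num 0 = some '0' then false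
  -- if len(set(num)) < 4: return False
  else if PySem.Set.len (PySem.Set.ofList num.toList) < 4 then false
  else
    -- for i in '2468': num = num.replace(i, '0')
    let n1 := "2468".toList.foldl (fun s i => PySem.Str.replace s (String.ofList [i]) "0") num
    -- for i in '3579': num = num.replace(i, '1')
    let n2 := "3579".toList.foldl (fun s i => PySem.Str.replace s (String.ofList [i]) "1") n1
    -- return ('00' not in num) and ('11' not in num)
    !(PySem.Str.isIn "00" n2) && !(PySem.Str.isIn "11" n2)

-- ===== PORT B =====
-- par(c) = int(c) % 2 if c.isdigit() else None  (c.toNat - 48 is int(c) for an ASCII digit: exact)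
def parity? (c : Char) : Option Nat :=
  if PySem.Chars.isdigit c then some ((c.toNat - 48) % 2) else none

-- the `for a, b in zip(num, num[1:])` loop with its early `return False`
def noBadPair : List Char → Bool
  | a :: b :: rest =>
    match parity? a, parity? b with
    | some pa, some pb => if pa = pb then false else noBadPair (b :: rest)
    | _, _ => noBadPair (b :: rest)
  | _ => true

def check_alt (num : String) : Bool :=
  if PySem.Str.pyGet? num 0 = some '0' then false
  else if PySem.Set.len (PySem.Set.ofList num.toList) < 4 then false
  else noBadPair num.toList

-- ===== PRECONDITION & SPEC =====
-- Pre_ excludes only the empty string, on which A (num[0]) raises IndexError.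
def Pre_check (num : String) : Prop := num ≠ ""
instance (num : String) : Decidable (Pre_check num) := by unfold Pre_check; infer_instance
def pvWitness_check : String := "1234"

def Spec_check (num : String) (out : Bool) : Prop := out = check_alt num
instance (num : String) (out : Bool) : Decidable (Spec_check num out) := by unfold Spec_check; infer_instance

-- ===== CLAIM (what is proved, stated in full; the proofs are below) =====
def Claim_equal_check : Prop := ∀ (num : String), Dom_check num → Pre_check num → Spec_check num (check num)

-- ===== LEMMAS AND PROOFS =====

-- single-character substitution (what one replace(i, d) does pointwise)
def rsub (o n c : Char) : Char := if c = o then n else c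

-- the composition of A's eight substitutions
def gsub (c : Char) : Char :=
  if c = '2' then '0' else if c = '4' then '0' else if c = '6' then '0' else if c = '8' then '0'
  else if c = '3' then '1' else if c = '5' then '1' else if c = '7' then '1' else if c = '9' then '1'
  else c

lemma replace_go_single (o n : Char) :
    ∀ (l : List Char) (fuel : Nat) (acc : List Char), l.length ≤ fuel →
      PySem.Chars.replace.go [o] [n] fuel l acc = acc.reverse ++ l.map (rsub o n) := by
  intro l
  induction l with
  | nil => intro fuel acc _; cases fuel <;> simp [PySem.Chars.replace.go]
  | cons c t ih =>
    intro fuel acc hlen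
    cases fuel with
    | zero => simp at hlen
    | succ f =>
      by_cases hc : c = o
      · subst hc
        have hpre : List.isPrefixOf [c] (c :: t) = true := by simp [List.isPrefixOf]
        simp only [PySem.Chars.replace.go, hpre, if_true]
        rw [show List.drop [c].length (c :: t) = t from rfl,
            show [n].reverse ++ acc = n :: acc from rfl,
            ih f _ (by simpa using Nat.le_of_succ_le_succ hlen)]
        simp [rsub]
      · have hpre : List.isPrefixOf [o] (c :: t) = false := by
          simp [List.isPrefixOf]
          intro h; exact hc h.symm
        simp only [PySem.Chars.replace.go, hpre, Bool.false_eq_true, if_false]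
        rw [ih f _ (by simpa using Nat.le_of_succ_le_succ hlen)]
        simp [rsub, hc]

lemma replace_single (cs : List Char) (o n : Char) :
    PySem.Chars.replace cs [o] [n] = cs.map (rsub o n) := by
  simp only [PySem.Chars.replace, List.isEmpty_cons, Bool.false_eq_true, if_false]
  rw [replace_go_single o n cs cs.length [] le_rfl]
  simp

lemma mapped_eq (num : String) :
    (("3579".toList.foldl (fun s i => PySem.Str.replace s (String.ofList [i]) "1")
      ("2468".toList.foldl (fun s i => PySem.Str.replace s (String.ofList [i]) "0") num))).toList
      = num.toList.map gsub := by
  rw [show "2468".toList = ['2','4','6','8'] from rfl, show "3579".toList = ['3','5','7','9'] from rfl]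
  simp only [List.foldl_cons, List.foldl_nil]
  simp only [PySem.Str.toList_replace]
  simp only [String.toList_ofList,
    show ("0" : String).toList = ['0'] from rfl, show ("1" : String).toList = ['1'] from rfl]
  simp only [replace_single, List.map_map]
  apply List.map_congr_left
  intro c _
  simp only [Function.comp]
  by_cases h2 : c = '2'; · subst h2; rfl
  by_cases h4 : c = '4'; · subst h4; rfl
  by_cases h6 : c = '6'; · subst h6; rfl
  by_cases h8 : c = '8'; · subst h8; rfl
  by_cases h3 : c = '3'; · subst h3; rfl
  by_cases h5 : c = '5'; · subst h5; rfl
  by_cases h7 : c = '7'; · subst h7; rfl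
  by_cases h9 : c = '9'; · subst h9; rfl
  simp [rsub, gsub, h2, h3, h4, h5, h6, h7, h8, h9]

lemma char_of_toNat (c : Char) (n : Nat) (h : c.toNat = n) (d : Char) (hd : d.toNat = n) : c = d := by
  apply Char.ext; apply UInt32.toNat_inj.mp; show c.toNat = d.toNat; rw [h, hd]

lemma isdigit_cases (c : Char) (h : PySem.Chars.isdigit c = true) :
    c = '0' ∨ c = '1' ∨ c = '2' ∨ c = '3' ∨ c = '4' ∨ c = '5' ∨ c = '6' ∨ c = '7' ∨ c = '8' ∨ c = '9' := by
  have hb : 48 ≤ c.toNat ∧ c.toNat ≤ 57 := by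
    simp only [PySem.Chars.isdigit, Bool.and_eq_true, decide_eq_true_eq, Char.le_def,
      UInt32.le_iff_toNat_le] at h
    exact h
  have hn : c.toNat = 48 ∨ c.toNat = 49 ∨ c.toNat = 50 ∨ c.toNat = 51 ∨ c.toNat = 52 ∨
      c.toNat = 53 ∨ c.toNat = 54 ∨ c.toNat = 55 ∨ c.toNat = 56 ∨ c.toNat = 57 := by omega
  rcases hn with h|h|h|h|h|h|h|h|h|h
  · exact Or.inl (char_of_toNat c 48 h '0' rfl)
  · exact Or.inr (Or.inl (char_of_toNat c 49 h '1' rfl))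
  · exact Or.inr (Or.inr (Or.inl (char_of_toNat c 50 h '2' rfl)))
  · exact Or.inr (Or.inr (Or.inr (Or.inl (char_of_toNat c 51 h '3' rfl))))
  · exact Or.inr (Or.inr (Or.inr (Or.inr (Or.inl (char_of_toNat c 52 h '4' rfl)))))
  · exact Or.inr (Or.inr (Or.inr (Or.inr (Or.inr (Or.inl (char_of_toNat c 53 h '5' rfl))))))
  · exact Or.inr (Or.inr (Or.inr (Or.inr (Or.inr (Or.inr (Or.inl (char_of_toNat c 54 h '6' rfl)))))))
  · exact Or.inr (Or.inr (Or.inr (Or.inr (Or.inr (Or.inr (Or.inr (Or.inl (char_of_toNat c 55 h '7' rfl))))))))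
  · exact Or.inr (Or.inr (Or.inr (Or.inr (Or.inr (Or.inr (Or.inr (Or.inr (Or.inl (char_of_toNat c 56 h '8' rfl)))))))))
  · exact Or.inr (Or.inr (Or.inr (Or.inr (Or.inr (Or.inr (Or.inr (Or.inr (Or.inr (char_of_toNat c 57 h '9' rfl)))))))))

lemma gsub_zero_iff (c : Char) : gsub c = '0' ↔ parity? c = some 0 := by
  by_cases hd : PySem.Chars.isdigit c = true
  · rcases isdigit_cases c hd with h|h|h|h|h|h|h|h|h|h <;> subst h <;> decide
  · have hc : ∀ d : Char, PySem.Chars.isdigit d = true → c ≠ d := by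
      intro d hdd he; exact hd (he ▸ hdd)
    have e2 := hc '2' (by decide); have e3 := hc '3' (by decide); have e4 := hc '4' (by decide)
    have e5 := hc '5' (by decide); have e6 := hc '6' (by decide); have e7 := hc '7' (by decide)
    have e8 := hc '8' (by decide); have e9 := hc '9' (by decide); have e0 := hc '0' (by decide)
    simp [gsub, parity?, hd, e2, e3, e4, e5, e6, e7, e8, e9, e0]

lemma gsub_one_iff (c : Char) : gsub c = '1' ↔ parity? c = some 1 := by
  by_cases hd : PySem.Chars.isdigit c = true
  · rcases isdigit_cases c hd with h|h|h|h|h|h|h|h|h|h <;> subst h <;> decide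
  · have hc : ∀ d : Char, PySem.Chars.isdigit d = true → c ≠ d := by
      intro d hdd he; exact hd (he ▸ hdd)
    have e2 := hc '2' (by decide); have e3 := hc '3' (by decide); have e4 := hc '4' (by decide)
    have e5 := hc '5' (by decide); have e6 := hc '6' (by decide); have e7 := hc '7' (by decide)
    have e8 := hc '8' (by decide); have e9 := hc '9' (by decide); have e1 := hc '1' (by decide)
    simp [gsub, parity?, hd, e2, e3, e4, e5, e6, e7, e8, e9, e1]

def hasPair (x y : Char) : List Char → Bool
  | a :: b :: rest => (a = x && b = y) || hasPair x y (b :: rest)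
  | _ => false

lemma infix_pair_iff (x y : Char) : ∀ (m : List Char), [x, y] <:+: m ↔ hasPair x y m = true := by
  intro m
  induction m with
  | nil => simp [hasPair]
  | cons c t ih =>
    cases t with
    | nil =>
      constructor
      · intro h
        rcases List.infix_cons_iff.mp h with h | h
        · rcases List.cons_prefix_cons.mp h with ⟨_, h2⟩
          have h3 := List.prefix_nil.mp h2
          simp at h3
        · simp at h
      · intro h; simp [hasPair] at h
    | cons d r =>
      simp only [hasPair, Bool.or_eq_true, Bool.and_eq_true, decide_eq_true_eq]
      rw [List.infix_cons_iff, ← ih]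
      constructor
      · rintro (h | h)
        · rcases List.cons_prefix_cons.mp h with ⟨h1, h2⟩
          rcases List.cons_prefix_cons.mp h2 with ⟨h3, _⟩
          exact Or.inl ⟨h1.symm, h3.symm⟩
        · exact Or.inr h
      · rintro (⟨h1, h2⟩ | h)
        · subst h1; subst h2
          exact Or.inl (List.cons_prefix_cons.mpr ⟨rfl, List.cons_prefix_cons.mpr ⟨rfl, List.nil_prefix⟩⟩)
        · exact Or.inr h

lemma parity_bound (c : Char) (p : Nat) (h : parity? c = some p) : p = 0 ∨ p = 1 := by
  by_cases hd : PySem.Chars.isdigit c = true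
  · simp only [parity?, hd, if_true, Option.some.injEq] at h
    omega
  · simp [parity?, hd] at h

lemma noBadPair_eq (cs : List Char) :
    noBadPair cs = (!hasPair '0' '0' (cs.map gsub) && !hasPair '1' '1' (cs.map gsub)) := by
  induction cs with
  | nil => simp [noBadPair, hasPair]
  | cons a t ih =>
    cases t with
    | nil => simp [noBadPair, hasPair]
    | cons b r =>
      cases hpa : parity? a with
      | none =>
        have ha0 : gsub a ≠ '0' := by
          intro h; have := (gsub_zero_iff a).mp h; rw [hpa] at this; cases this
        have ha1 : gsub a ≠ '1' := by
          intro h; have := (gsub_one_iff a).mp h; rw [hpa] at this; cases this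
        simp only [noBadPair, hpa, List.map_cons, hasPair]
        rw [ih]
        simp [ha0, ha1]
      | some pa =>
        cases hpb : parity? b with
        | none =>
          have hb0 : gsub b ≠ '0' := by
            intro h; have := (gsub_zero_iff b).mp h; rw [hpb] at this; cases this
          have hb1 : gsub b ≠ '1' := by
            intro h; have := (gsub_one_iff b).mp h; rw [hpb] at this; cases this
          simp only [noBadPair, hpa, hpb, List.map_cons, hasPair]
          rw [ih]
          simp [hb0, hb1]
        | some pb =>
          rcases parity_bound a pa hpa with h0a | h1a <;> rcases parity_bound b pb hpb with h0b | h1b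
          · subst h0a; subst h0b
            have ha : gsub a = '0' := (gsub_zero_iff a).mpr hpa
            have hb : gsub b = '0' := (gsub_zero_iff b).mpr hpb
            simp [noBadPair, hpa, hpb, hasPair, ha, hb]
          · subst h0a; subst h1b
            have ha : gsub a = '0' := (gsub_zero_iff a).mpr hpa
            have hb : gsub b = '1' := (gsub_one_iff b).mpr hpb
            have ha1 : gsub a ≠ '1' := by rw [ha]; decide
            have hb0 : gsub b ≠ '0' := by rw [hb]; decide
            simp only [noBadPair, hpa, hpb, List.map_cons, hasPair]
            rw [ih]
            simp [ha1, hb0]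
          · subst h1a; subst h0b
            have ha : gsub a = '1' := (gsub_one_iff a).mpr hpa
            have hb : gsub b = '0' := (gsub_zero_iff b).mpr hpb
            have ha0 : gsub a ≠ '0' := by rw [ha]; decide
            have hb1 : gsub b ≠ '1' := by rw [hb]; decide
            simp only [noBadPair, hpa, hpb, List.map_cons, hasPair]
            rw [ih]
            simp [ha0, hb1]
          · subst h1a; subst h1b
            have ha : gsub a = '1' := (gsub_one_iff a).mpr hpa
            have hb : gsub b = '1' := (gsub_one_iff b).mpr hpb
            simp [noBadPair, hpa, hpb, hasPair, ha, hb]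

lemma isIn_eq_hasPair (x y : Char) (m : List Char) :
    PySem.Chars.isIn [x, y] m = hasPair x y m := by
  by_cases h : hasPair x y m = true
  · rw [h]; exact (PySem.Chars.isIn_iff_infix _ _).mpr ((infix_pair_iff x y m).mpr h)
  · rw [Bool.eq_false_iff.mpr h, ← Bool.not_eq_true]
    intro hc
    exact h ((infix_pair_iff x y m).mp ((PySem.Chars.isIn_iff_infix _ _).mp hc))

-- ===== VERDICT (by name: the statement is the Claim_ definition above) =====
theorem check_spec : Claim_equal_check := by
  intro num _ _
  unfold Spec_check check check_alt
  by_cases h1 : PySem.Str.pyGet? num 0 = some '0'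
  · rw [if_pos h1, if_pos h1]
  · rw [if_neg h1, if_neg h1]
    by_cases h2 : PySem.Set.len (PySem.Set.ofList num.toList) < 4
    · rw [if_pos h2, if_pos h2]
    · rw [if_neg h2, if_neg h2]
      rw [noBadPair_eq]
      simp only [PySem.Str.isIn_eq, mapped_eq num,
        show ("00" : String).toList = ['0','0'] from rfl,
        show ("11" : String).toList = ['1','1'] from rfl,
        isIn_eq_hasPair]
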